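-- pv_equiv track=rewrite | github.com/openSUSE/permissions | tools/list_permissions.py | extractCommonComments
-- ===== SOURCE A (Python) =====
-- def extractCommonComments(profiles):
-- 	# merge comments for different profiles if they are present and equal
-- 	ret = []
-- 	while True:
-- 		comments = { entry["comments"][0] if entry["comments"] else "" for entry in profiles.values() }
-- 		line = comments.pop() if len(comments) == 1 else ""
-- 		if line:
-- 			ret.append(line)
-- 			for profile in profiles:
-- 				profiles[profile]["comments"].pop(0)
-- 		else:
-- 			return ret
-- ===== SOURCE B (Python) =====
-- def extractCommonComments(profiles):
--     # One prefix pass over the zipped comment lists, then one batch slice-delete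
--     # per profile (same in-place mutation as the original's repeated pop(0)).
--     comment_lists = [p["comments"] for p in profiles.values()]
--     ret = []
--     if comment_lists:
--         for group in zip(*comment_lists):
--             line = group[0]
--             if line and all(g == line for g in group[1:]):
--                 ret.append(line)
--             else:
--                 break
--         n = len(ret)
--         for cl in comment_lists:
--             del cl[:n]
--     return ret
-- ===== Notes on version B (the rewrite author's own statement) =====
-- stated objective: simpler
-- what changed: A repeatedly rebuilds a set of the current first comments and pops one line per profile per iteration; B computes the shared nonempty prefix in a single pass over the zipped comment lists and then consumes it with one batch slice-delete per profile.
import Mathlib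
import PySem

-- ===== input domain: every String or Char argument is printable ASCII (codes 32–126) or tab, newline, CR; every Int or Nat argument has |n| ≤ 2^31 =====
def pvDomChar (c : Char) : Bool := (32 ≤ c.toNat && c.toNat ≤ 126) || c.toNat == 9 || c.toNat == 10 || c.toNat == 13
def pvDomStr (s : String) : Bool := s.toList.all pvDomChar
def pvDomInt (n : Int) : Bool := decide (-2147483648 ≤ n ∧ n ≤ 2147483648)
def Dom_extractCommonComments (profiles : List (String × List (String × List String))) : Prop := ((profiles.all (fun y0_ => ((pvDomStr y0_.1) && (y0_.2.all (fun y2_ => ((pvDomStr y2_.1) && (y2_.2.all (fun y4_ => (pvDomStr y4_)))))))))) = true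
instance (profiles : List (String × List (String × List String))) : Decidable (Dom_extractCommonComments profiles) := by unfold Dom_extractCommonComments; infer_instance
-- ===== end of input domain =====

-- B replaces A's repeated set-rebuild-and-pop(0) loop by one pass over the zipped comment
-- lists plus one batch slice-delete per profile (objective: simpler). Both Pythons mutate
-- the profiles in place identically; the equivalence proved here is about the return value.

-- ===== PORT A =====

-- entry["comments"] (first match; a missing "comments" key is a KeyError in Python,
-- excluded by Pre_; the port reads [] there)
def pvCommentsOf (e : List (String × List String)) : List String :=
  ((PySem.Dict.mk e).get? "comments").getD []

-- entry["comments"][0] if entry["comments"] else ""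
def pvFirstComment (e : List (String × List String)) : String :=
  match pvCommentsOf e with
  | [] => ""
  | c :: _ => c

-- profiles[profile]["comments"].pop(0): the entry's comments list loses its head
def pvPopComments (e : List (String × List String)) : List (String × List String) :=
  e.map (fun kv => if kv.1 = "comments" then (kv.1, kv.2.tail) else kv)

-- helpers for the termination proof of the while-True loop below
lemma pvSum_map_lt {α : Type} (l : List α) (f g : α → Nat) (hne : l ≠ [])
    (h : ∀ x ∈ l, f x < g x) : (l.map f).sum < (l.map g).sum := by
  induction l with
  | nil => exact absurd rfl hne
  | cons a t ih =>
    rcases Decidable.em (t = []) with ht | ht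
    · subst ht; simpa using h a (by simp)
    · have := ih ht (fun x hx => h x (by simp [hx]))
      have ha := h a (by simp)
      simp only [List.map_cons, List.sum_cons]
      omega

lemma pvCommentsOf_pop (e : List (String × List String)) :
    pvCommentsOf (pvPopComments e) = (pvCommentsOf e).tail := by
  induction e with
  | nil => rfl
  | cons kv rest ih =>
    obtain ⟨k, v⟩ := kv
    by_cases hk : k = "comments"
    · subst hk
      simp [pvCommentsOf, pvPopComments, PySem.Dict.get?_mk_cons]
    · have hbeq : (k == "comments") = false := by simpa using hk
      simp only [pvCommentsOf, pvPopComments, List.map_cons, if_neg hk,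
        PySem.Dict.get?_mk_cons, hbeq, Bool.false_eq_true, if_false] at ih ⊢
      exact ih

lemma pvFirstComment_eq (e : List (String × List String)) :
    pvFirstComment e = (pvCommentsOf e).headD "" := by
  unfold pvFirstComment
  cases pvCommentsOf e <;> rfl

-- the set comprehension + singleton .pop() of one loop iteration of A
def pvLine (profiles : List (String × List (String × List String))) : String :=
  let comments : PySem.Set String :=
    PySem.Set.ofList (profiles.map fun pe => pvFirstComment pe.2)
  if comments.length = 1 then comments.headD "" else ""

lemma pvLine_spec (profiles : List (String × List (String × List String)))
    (h : pvLine profiles ≠ "") :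
    profiles ≠ [] ∧ ∀ pe ∈ profiles, pvFirstComment pe.2 = pvLine profiles := by
  have h' := h
  unfold pvLine at h' ⊢
  set F := profiles.map fun pe => pvFirstComment pe.2 with hF
  by_cases hlen : (PySem.Set.ofList F).length = 1
  · rw [if_pos hlen] at h' ⊢
    set a := (PySem.Set.ofList F).headD "" with ha
    have hset : PySem.Set.ofList F = [a] := by
      rcases hsf : PySem.Set.ofList F with _ | ⟨x, t⟩
      · rw [hsf] at hlen; simp at hlen
      · rw [hsf] at hlen; simp at hlen
        subst hlen; simp [ha, hsf]
    have hall : ∀ x ∈ F, x = a := by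
      intro x hx
      have : x ∈ PySem.Set.ofList F := (PySem.Set.mem_ofList F x).2 hx
      rw [hset] at this; simpa using this
    refine ⟨?_, ?_⟩
    · intro hnil; rw [hnil] at hF
      simp [hF, PySem.Set.ofList, PySem.Set.empty] at hset
    · intro pe hpe
      exact hall _ (List.mem_map_of_mem hpe)
  · rw [if_neg hlen] at h'; exact absurd rfl h'

lemma pvMeasure_lt (profiles : List (String × List (String × List String)))
    (h : pvLine profiles ≠ "") :
    (((profiles.map fun pe => (pe.1, pvPopComments pe.2)).map
        (fun pe => (pvCommentsOf pe.2).length)).sum)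
      < (profiles.map (fun pe => (pvCommentsOf pe.2).length)).sum := by
  obtain ⟨hne, hall⟩ := pvLine_spec profiles h
  rw [List.map_map]
  refine pvSum_map_lt profiles _ _ hne ?_
  intro pe hpe
  have hfirst := hall pe hpe
  have hcne : pvCommentsOf pe.2 ≠ [] := by
    intro hnil
    rw [pvFirstComment_eq, hnil] at hfirst
    exact h (by simpa using hfirst.symm)
  rw [Function.comp_apply, pvCommentsOf_pop]
  cases hc : pvCommentsOf pe.2 with
  | nil => exact absurd hc hcne
  | cons c cs => simp

-- the while-True loop of A, state = (profiles, ret)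
def extractCommonCommentsAux (profiles : List (String × List (String × List String)))
    (ret : List String) : List String :=
  if pvLine profiles ≠ "" then
    extractCommonCommentsAux (profiles.map fun pe => (pe.1, pvPopComments pe.2))
      (ret ++ [pvLine profiles])
  else ret
termination_by (profiles.map (fun pe => (pvCommentsOf pe.2).length)).sum
decreasing_by
  simp only [List.map_subtype, List.unattach_attach]
  exact pvMeasure_lt profiles (by assumption)

def extractCommonComments (profiles : List (String × List (String × List String))) : List String :=
  extractCommonCommentsAux profiles []

-- ===== PORT B =====

lemma pvZipStar_dec (ls : List (List String))
    (h : ¬(ls = [] ∨ ls.any (· == []) = true)) :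
    ((ls.map (·.tail)).headD []).length < (ls.headD []).length := by
  rw [not_or] at h
  obtain ⟨h1, h2⟩ := h
  cases ls with
  | nil => exact absurd rfl h1
  | cons c t =>
    have hc : c ≠ [] := by
      intro hnil
      exact h2 (by simp [hnil])
    cases c with
    | nil => exact absurd rfl hc
    | cons x xs => simp

-- zip(*lists): rows of heads while every list is nonempty
def pvZipStar (ls : List (List String)) : List (List String)  :=
  if ls = [] ∨ ls.any (· == []) = true then []
  else (ls.map (·.headD "")) :: pvZipStar (ls.map (·.tail))
termination_by (ls.headD []).length
decreasing_by
  simp only [List.map_subtype, List.unattach_attach]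
  exact pvZipStar_dec ls (by assumption)

-- line and all(g == line for g in group[1:])
def pvRowOk (row : List String) : Bool :=
  let line := row.headD ""
  (line != "") && row.tail.all (· == line)

def extractCommonComments_alt (profiles : List (String × List (String × List String))) : List String :=
  let commentLists := profiles.map fun pe => ((PySem.Dict.mk pe.2).get? "comments").getD []
  if commentLists = [] then []
  else ((pvZipStar commentLists).takeWhile pvRowOk).map (·.headD "")

-- ===== PRECONDITION & SPEC =====
-- Pre_ excludes (a) profiles with an entry lacking a "comments" key, on which the Python A
-- raises KeyError, and (b) association lists with duplicate keys (outer profile names or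
-- keys inside one entry), which do not faithfully represent a Python dict.
def Pre_extractCommonComments (profiles : List (String × List (String × List String))) : Prop :=
  (profiles.map Prod.fst).Nodup ∧
  ∀ pe ∈ profiles, (pe.2.map Prod.fst).Nodup ∧ (PySem.Dict.mk pe.2).contains "comments" = true
instance (profiles : List (String × List (String × List String))) : Decidable (Pre_extractCommonComments profiles) := by unfold Pre_extractCommonComments; infer_instance

def pvWitness_extractCommonComments : (List (String × List (String × List String))) :=
  [("a", [("comments", ["# x", "# y"])]), ("b", [("comments", ["# x"])])]

def Spec_extractCommonComments (profiles : List (String × List (String × List String))) (out : List String) : Prop := out = extractCommonComments_alt profiles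
instance (profiles : List (String × List (String × List String))) (out : List String) : Decidable (Spec_extractCommonComments profiles out) := by unfold Spec_extractCommonComments; infer_instance

-- ===== CLAIM (what is proved, stated in full; the proofs are below) =====
def Claim_equal_extractCommonComments : Prop := ∀ (profiles : List (String × List (String × List String))), Dom_extractCommonComments profiles → Pre_extractCommonComments profiles → Spec_extractCommonComments profiles (extractCommonComments profiles)

-- ===== LEMMAS AND PROOFS =====

-- B's core as a function of the comment lists alone
def pvBcore (ls : List (List String)) : List String :=
  ((pvZipStar ls).takeWhile pvRowOk).map (·.headD "")

lemma pvZipStar_eq (ls : List (List String)) :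
    pvZipStar ls = if ls = [] ∨ ls.any (· == []) = true then []
      else (ls.map (·.headD "")) :: pvZipStar (ls.map (·.tail)) := by
  conv_lhs => unfold pvZipStar

lemma pvZipStar_nil : pvZipStar [] = [] := by
  rw [pvZipStar_eq]; simp

lemma pvAlt_eq_bcore (profiles : List (String × List (String × List String))) :
    extractCommonComments_alt profiles = pvBcore (profiles.map fun pe => pvCommentsOf pe.2) := by
  unfold extractCommonComments_alt pvBcore pvCommentsOf
  by_cases hnil : profiles = []
  · subst hnil; simp [pvZipStar_nil]
  · rw [if_neg (by simpa using hnil)]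

lemma pvFoldl_add_const (t : List String) (a : String) (h : ∀ x ∈ t, x = a) :
    t.foldl PySem.Set.add [a] = [a] := by
  induction t with
  | nil => rfl
  | cons x t ih =>
    have hx : x = a := h x (by simp)
    subst hx
    have : PySem.Set.add [x] x = [x] := by simp [PySem.Set.add]
    rw [List.foldl_cons, this]
    exact ih (fun y hy => h y (by simp [hy]))

lemma pvOfList_const (xs : List String) (a : String) (hne : xs ≠ []) (h : ∀ x ∈ xs, x = a) :
    PySem.Set.ofList xs = [a] := by
  cases xs with
  | nil => exact absurd rfl hne
  | cons x t =>
    have hx : x = a := h x (by simp)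
    subst hx
    show List.foldl PySem.Set.add PySem.Set.empty (x :: t) = [x]
    rw [List.foldl_cons]
    have : PySem.Set.add PySem.Set.empty x = [x] := by simp [PySem.Set.add, PySem.Set.empty]
    rw [this]
    exact pvFoldl_add_const t x (fun y hy => h y (by simp [hy]))

lemma pvBcore_cons (ls : List (List String)) (a : String) (hne : ls ≠ []) (ha : a ≠ "")
    (hheads : ∀ c ∈ ls, c.headD "" = a) (hcn : ∀ c ∈ ls, c ≠ []) :
    pvBcore ls = a :: pvBcore (ls.map (·.tail)) := by
  have hcond : ¬(ls = [] ∨ ls.any (· == []) = true) := by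
    rw [not_or]
    refine ⟨hne, ?_⟩
    intro hany
    obtain ⟨c, hc, hceq⟩ := List.any_eq_true.mp hany
    exact hcn c hc (by simpa using hceq)
  unfold pvBcore
  rw [pvZipStar_eq, if_neg hcond]
  have hrowok : pvRowOk (ls.map (·.headD "")) = true := by
    unfold pvRowOk
    rw [Bool.and_eq_true]
    constructor
    · cases ls with
      | nil => exact absurd rfl hne
      | cons c t =>
        have h2 := hheads c (by simp)
        simp only [List.map_cons, List.headD_cons, bne_iff_ne, ne_eq]
        rw [h2]
        exact ha
    · cases ls with
      | nil => simp
      | cons c t =>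
        simp only [List.map_cons, List.tail_cons, List.headD_cons]
        rw [List.all_eq_true]
        intro x hx
        obtain ⟨d, hd, rfl⟩ := List.mem_map.mp hx
        have h1 := hheads d (by simp [hd])
        have h2 := hheads c (by simp)
        simp only [beq_iff_eq]
        rw [h1, h2]
  rw [List.takeWhile_cons_of_pos hrowok, List.map_cons]
  congr 1
  cases ls with
  | nil => exact absurd rfl hne
  | cons c t => simpa using hheads c (by simp)

lemma pvLine_ne_of_rowOk (profiles : List (String × List (String × List String)))
    (hne : profiles ≠ [])
    (hrow : pvRowOk ((profiles.map fun pe => pvCommentsOf pe.2).map (·.headD "")) = true) :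
    pvLine profiles ≠ "" := by
  have hFrow : (profiles.map fun pe => pvFirstComment pe.2)
      = (profiles.map fun pe => pvCommentsOf pe.2).map (·.headD "") := by
    rw [List.map_map]
    exact List.map_congr_left (fun pe _ => pvFirstComment_eq pe.2)
  set row := (profiles.map fun pe => pvCommentsOf pe.2).map (·.headD "") with hrowdef
  unfold pvRowOk at hrow
  rw [Bool.and_eq_true] at hrow
  obtain ⟨hbne, hallb⟩ := hrow
  have hline' : row.headD "" ≠ "" := by simpa using hbne
  have hrowne : row ≠ [] := by
    intro hr
    rw [hrowdef] at hr
    simp at hr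
    exact hne hr
  have hallx : ∀ x ∈ row, x = row.headD "" := by
    cases hr : row with
    | nil => simp
    | cons x t =>
      rw [hr] at hallb
      simp only [List.tail_cons, List.headD_cons] at hallb
      rw [List.all_eq_true] at hallb
      intro y hy
      simp only [List.headD_cons]
      rcases List.mem_cons.mp hy with h1 | h2
      · exact h1
      · simpa using hallb y h2
  have hset := pvOfList_const row (row.headD "") hrowne hallx
  unfold pvLine
  rw [hFrow, hset]
  simpa using hline'

-- the main loop invariant: A's loop appends exactly B's common prefix
lemma pvAux_eq (n : Nat) (profiles : List (String × List (String × List String)))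
    (ret : List String)
    (hn : (profiles.map (fun pe => (pvCommentsOf pe.2).length)).sum = n) :
    extractCommonCommentsAux profiles ret
      = ret ++ pvBcore (profiles.map fun pe => pvCommentsOf pe.2) := by
  induction n using Nat.strong_induction_on generalizing profiles ret with
  | _ n ih =>
  rw [extractCommonCommentsAux.eq_def]
  by_cases h : pvLine profiles ≠ ""
  · rw [if_pos h]
    obtain ⟨hne, hall⟩ := pvLine_spec profiles h
    have hls_ne : (profiles.map fun pe => pvCommentsOf pe.2) ≠ [] := by simpa using hne
    have hheads : ∀ c ∈ (profiles.map fun pe => pvCommentsOf pe.2),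
        c.headD "" = pvLine profiles := by
      intro c hc
      obtain ⟨pe, hpe, rfl⟩ := List.mem_map.mp hc
      rw [← pvFirstComment_eq]
      exact hall pe hpe
    have hcn : ∀ c ∈ (profiles.map fun pe => pvCommentsOf pe.2), c ≠ [] := by
      intro c hc hcnil
      have hthis := hheads c hc
      rw [hcnil] at hthis
      exact h (by simpa using hthis.symm)
    have hpop : ((profiles.map fun pe => (pe.1, pvPopComments pe.2)).map
          (fun pe => pvCommentsOf pe.2))
        = (profiles.map fun pe => pvCommentsOf pe.2).map (·.tail) := by
      rw [List.map_map, List.map_map]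
      exact List.map_congr_left (fun pe _ => pvCommentsOf_pop pe.2)
    have hlt := pvMeasure_lt profiles h
    rw [hn] at hlt
    have ihres := ih _ hlt (profiles.map fun pe => (pe.1, pvPopComments pe.2))
      (ret ++ [pvLine profiles]) rfl
    rw [ihres, hpop, pvBcore_cons _ _ hls_ne h hheads hcn]
    simp
  · rw [if_neg h]
    rw [ne_eq, not_not] at h
    suffices hsuf : pvBcore (profiles.map fun pe => pvCommentsOf pe.2) = [] by
      rw [hsuf]; simp
    by_cases hnil : profiles = []
    · subst hnil
      simp [pvBcore, pvZipStar_nil]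
    · by_cases hany : (profiles.map fun pe => pvCommentsOf pe.2).any (· == []) = true
      · unfold pvBcore
        rw [pvZipStar_eq, if_pos (Or.inr hany)]
        rfl
      · unfold pvBcore
        rw [pvZipStar_eq,
          if_neg (by rw [not_or]; exact ⟨by simpa using hnil, hany⟩)]
        have hrowbad : pvRowOk ((profiles.map fun pe => pvCommentsOf pe.2).map (·.headD ""))
            = false := by
          by_contra hcon
          rw [Bool.not_eq_false] at hcon
          exact pvLine_ne_of_rowOk profiles hnil hcon h
        rw [List.takeWhile_cons_of_neg (by rw [hrowbad]; simp), List.map_nil]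

-- ===== VERDICT (by name: the statement is the Claim_ definition above) =====
theorem extractCommonComments_spec : Claim_equal_extractCommonComments := by
  intro profiles _ _
  unfold Spec_extractCommonComments
  rw [extractCommonComments, pvAux_eq _ profiles [] rfl, pvAlt_eq_bcore]
  rfl
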